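-- pv_equiv track=rewrite | github.com/JohnDorsey/PyCellEliminationRun | SpiralMath.py | decustomizedSpiralCoord
-- ===== SOURCE A (Python) =====
-- def coordRotatedCCW(coord):
--   return (-coord[1],coord[0])
--
-- def coordSum(coords):
--   result = (0,0)
--   for coord in coords:
--     result = (result[0] + coord[0], result[1] + coord[1])
--   return result
--
-- def scaledCoord(coord,scalar):
--   return (coord[0]*scalar,coord[1]*scalar)
--
-- def decustomizedSpiralCoord(coord, home=None, rot=None, spin=None):
--   assert len(coord) == 2 and len(home) == 2
--   assert spin in [1,-1] #1 is CW, -1 is CCW.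
--   result = coordSum([coord,scaledCoord(home,-1)])
--   for i in range(rot%4): #0 1 2 3 -> first step is N E S W
--     result = coordRotatedCCW(result)
--   result = (result[0]*spin, result[1])
--   return result
-- ===== SOURCE B (Python) =====
-- def decustomizedSpiralCoord(coord, home=None, rot=None, spin=None):
--   assert len(coord) == 2 and len(home) == 2
--   assert spin in [1,-1] #1 is CW, -1 is CCW.
--   dx = coord[0] - home[0]
--   dy = coord[1] - home[1]
--   r = rot % 4
--   if r == 0:
--     rx, ry = dx, dy
--   elif r == 1:
--     rx, ry = -dy, dx
--   elif r == 2: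
--     rx, ry = -dx, -dy
--   else:
--     rx, ry = dy, -dx
--   return (rx*spin, ry)
-- ===== Notes on version B (the rewrite author's own statement) =====
-- stated objective: simpler
-- what changed: Replaces the list-sum/negate-scale helpers and the rot%4 rotation loop with a direct closed-form case split on rot%4 applied to the translated coordinate.
import Mathlib
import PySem

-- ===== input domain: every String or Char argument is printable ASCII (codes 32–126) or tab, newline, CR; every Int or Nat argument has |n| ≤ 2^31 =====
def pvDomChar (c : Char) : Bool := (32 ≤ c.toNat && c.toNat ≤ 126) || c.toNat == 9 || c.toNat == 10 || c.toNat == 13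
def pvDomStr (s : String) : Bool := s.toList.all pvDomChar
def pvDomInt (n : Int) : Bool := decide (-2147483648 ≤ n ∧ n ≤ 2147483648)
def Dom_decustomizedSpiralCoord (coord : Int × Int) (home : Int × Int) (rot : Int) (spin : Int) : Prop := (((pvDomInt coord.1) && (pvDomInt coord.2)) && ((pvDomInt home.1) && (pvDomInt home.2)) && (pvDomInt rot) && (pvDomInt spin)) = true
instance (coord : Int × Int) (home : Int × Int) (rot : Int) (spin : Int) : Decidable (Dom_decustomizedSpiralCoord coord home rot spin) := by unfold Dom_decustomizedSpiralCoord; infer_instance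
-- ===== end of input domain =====

-- B replaces A's helper-based translation and rot%4 rotation loop with a closed-form case split on rot%4 (equally fast; simpler).


-- ===== PORT A =====
def coordRotatedCCW (coord : Int × Int) : Int × Int := (-coord.2, coord.1)

def coordSum (coords : List (Int × Int)) : Int × Int :=
  coords.foldl (fun result coord => (result.1 + coord.1, result.2 + coord.2)) (0, 0)

def scaledCoord (coord : Int × Int) (scalar : Int) : Int × Int := (coord.1 * scalar, coord.2 * scalar)

def decustomizedSpiralCoord (coord : Int × Int) (home : Int × Int) (rot : Int) (spin : Int) : Int × Int :=
  -- asserts: len checks hold by type; 'spin in [1,-1]' is Pre_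
  let result := coordSum [coord, scaledCoord home (-1)]
  let result := (PySem.List.pyRange 0 (PySem.Int.mod rot 4) 1).foldl
    (fun r _ => coordRotatedCCW r) result
  (result.1 * spin, result.2)

-- ===== PORT B =====
def decustomizedSpiralCoord_alt (coord : Int × Int) (home : Int × Int) (rot : Int) (spin : Int) : Int × Int :=
  let dx := coord.1 - home.1
  let dy := coord.2 - home.2
  let r := PySem.Int.mod rot 4
  let rxy : Int × Int :=
    if r = 0 then (dx, dy)
    else if r = 1 then (-dy, dx)
    else if r = 2 then (-dx, -dy)
    else (dy, -dx)
  (rxy.1 * spin, rxy.2)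

-- ===== PRECONDITION & SPEC =====
-- Pre_ excludes exactly the inputs where A's 'assert spin in [1,-1]' raises AssertionError.
def Pre_decustomizedSpiralCoord (coord : Int × Int) (home : Int × Int) (rot : Int) (spin : Int) : Prop := spin = 1 ∨ spin = -1
instance (coord : Int × Int) (home : Int × Int) (rot : Int) (spin : Int) : Decidable (Pre_decustomizedSpiralCoord coord home rot spin) := by unfold Pre_decustomizedSpiralCoord; infer_instance
def pvWitness_decustomizedSpiralCoord : (Int × Int) × (Int × Int) × Int × Int := ((3, -2), (1, 1), 5, -1)

def Spec_decustomizedSpiralCoord (coord : Int × Int) (home : Int × Int) (rot : Int) (spin : Int) (out : Int × Int) : Prop := out = decustomizedSpiralCoord_alt coord home rot spin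
instance (coord : Int × Int) (home : Int × Int) (rot : Int) (spin : Int) (out : Int × Int) : Decidable (Spec_decustomizedSpiralCoord coord home rot spin out) := by unfold Spec_decustomizedSpiralCoord; infer_instance

-- ===== CLAIM (what is proved, stated in full; the proofs are below) =====
def Claim_equal_decustomizedSpiralCoord : Prop := ∀ (coord : Int × Int) (home : Int × Int) (rot : Int) (spin : Int), Dom_decustomizedSpiralCoord coord home rot spin → Pre_decustomizedSpiralCoord coord home rot spin → Spec_decustomizedSpiralCoord coord home rot spin (decustomizedSpiralCoord coord home rot spin)

-- ===== LEMMAS AND PROOFS =====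
theorem mod4_cases (rot : Int) :
    PySem.Int.mod rot 4 = 0 ∨ PySem.Int.mod rot 4 = 1 ∨ PySem.Int.mod rot 4 = 2 ∨ PySem.Int.mod rot 4 = 3 := by
  simp only [PySem.Int.mod, Int.fmod_eq_emod]
  omega

-- ===== VERDICT (by name: the statement is the Claim_ definition above) =====
theorem decustomizedSpiralCoord_spec : Claim_equal_decustomizedSpiralCoord := by
  intro coord home rot spin _ _
  unfold Spec_decustomizedSpiralCoord decustomizedSpiralCoord decustomizedSpiralCoord_alt
  rcases mod4_cases rot with h | h | h | h <;>
    rw [h] <;>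
    simp [coordSum, scaledCoord, coordRotatedCCW, PySem.List.pyRange_one, List.range_succ] <;>
    exact ⟨Or.inl (by ring), by ring⟩
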